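-- pv_equiv track=rewrite | github.com/AndreaOrlando23/python-workout | ex9.py | even_odd_sums
-- ===== SOURCE A (Python) =====
-- def even_odd_sums(sequence):
--     even = []
--     odd = []
--     for index, value in enumerate(sequence):
--         if index % 2 == 0:
--             even.append(value)
--         else:
--             odd.append(value)
--
--     return [sum(even), sum(odd)]
-- ===== SOURCE B (Python) =====
-- def even_odd_sums(sequence):
--     return [sum(sequence[::2]), sum(sequence[1::2])]
-- ===== Notes on version B (the rewrite author's own statement) =====
-- stated objective: idiomatic
-- what changed: Replaced the enumerate loop with its parity branch and two accumulator lists by two strided slices summed directly.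
import Mathlib
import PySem

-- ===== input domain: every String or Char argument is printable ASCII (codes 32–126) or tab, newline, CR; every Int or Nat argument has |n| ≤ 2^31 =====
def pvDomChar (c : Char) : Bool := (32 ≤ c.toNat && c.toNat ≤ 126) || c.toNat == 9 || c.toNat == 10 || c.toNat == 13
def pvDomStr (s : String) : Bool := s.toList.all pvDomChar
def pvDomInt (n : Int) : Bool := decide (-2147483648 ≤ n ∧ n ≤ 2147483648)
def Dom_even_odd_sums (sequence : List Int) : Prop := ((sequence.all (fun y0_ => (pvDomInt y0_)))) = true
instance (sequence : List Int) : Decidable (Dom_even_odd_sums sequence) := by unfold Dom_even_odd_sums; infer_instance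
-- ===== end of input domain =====

-- B replaces A's enumerate loop with parity branch by two strided slices summed directly (idiomatic rewrite, same cost).


-- ===== PORT A =====
-- literal transliteration: enumerate loop appending each value to `even` or `odd` by index parity
def even_odd_sums (sequence : List Int) : List Int :=
  let acc := (PySem.List.enumerate sequence).foldl
    (fun (acc : List Int × List Int) p =>
      if p.1 % 2 == 0 then (acc.1 ++ [p.2], acc.2) else (acc.1, acc.2 ++ [p.2]))
    ([], [])
  [acc.1.sum, acc.2.sum]

-- ===== PORT B =====
-- literal transliteration of Source B: sum(sequence[::2]) and sum(sequence[1::2]);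
-- step 2 ≠ 0 so slice? always returns some — getD [] only makes the expression total, it is exact here
def even_odd_sums_alt (sequence : List Int) : List Int :=
  [((PySem.List.slice? sequence none none 2).getD []).sum,
   ((PySem.List.slice? sequence (some 1) none 2).getD []).sum]

-- ===== PRECONDITION & SPEC =====
def Spec_even_odd_sums (sequence : List Int) (out : List Int) : Prop := out = even_odd_sums_alt sequence
instance (sequence : List Int) (out : List Int) : Decidable (Spec_even_odd_sums sequence out) := by unfold Spec_even_odd_sums; infer_instance

-- ===== CLAIM (what is proved, stated in full; the proofs are below) =====
def Claim_equal_even_odd_sums : Prop := ∀ (sequence : List Int), Dom_even_odd_sums sequence → Spec_even_odd_sums sequence (even_odd_sums sequence)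

-- ===== LEMMAS AND PROOFS =====

/-- every-other element starting at position 0 -/
def takeEveryOther : List Int → List Int
  | [] => []
  | [a] => [a]
  | a :: _ :: t => a :: takeEveryOther t

theorem takeEveryOther_cons (a : Int) (t : List Int) :
    takeEveryOther (a :: t) = a :: takeEveryOther t.tail := by
  cases t <;> rfl

theorem foldl_enum (xs : List Int) (s : Int) (ev od : List Int) (hs : 0 ≤ s) :
    (PySem.List.enumerate xs s).foldl
      (fun (acc : List Int × List Int) p =>
        if p.1 % 2 == 0 then (acc.1 ++ [p.2], acc.2) else (acc.1, acc.2 ++ [p.2]))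
      (ev, od) =
    if s % 2 = 0 then (ev ++ takeEveryOther xs, od ++ takeEveryOther xs.tail)
    else (ev ++ takeEveryOther xs.tail, od ++ takeEveryOther xs) := by
  induction xs generalizing s ev od with
  | nil => simp [PySem.List.enumerate_nil, takeEveryOther]
  | cons a t ih =>
    rw [PySem.List.enumerate_cons, List.foldl_cons]
    simp only [beq_iff_eq] at ih ⊢
    by_cases h : s % 2 = 0
    · have h1 : (s + 1) % 2 ≠ 0 := by omega
      rw [if_pos h, if_pos h]
      rw [ih (s + 1) (ev ++ [a]) od (by omega), if_neg h1]
      simp [takeEveryOther_cons]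
    · have h1 : (s + 1) % 2 = 0 := by omega
      rw [if_neg h, if_neg h]
      rw [ih (s + 1) ev (od ++ [a]) (by omega), if_pos h1]
      simp [takeEveryOther_cons]

theorem filterMap_stride2 (ys : List Int) :
    List.filterMap (fun k => ys[2 * k]?) (List.range ((ys.length + 1) / 2)) =
    takeEveryOther ys := by
  induction ys using takeEveryOther.induct with
  | case1 => simp [takeEveryOther]
  | case2 a => simp [takeEveryOther]
  | case3 a b t ih =>
    simp only [List.length_cons] at *
    have : (t.length + 1 + 1 + 1) / 2 = (t.length + 1) / 2 + 1 := by omega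
    rw [this, List.range_succ_eq_map, List.filterMap_cons, List.filterMap_map]
    have h0 : (a :: b :: t)[2 * 0]? = some a := by simp
    rw [h0]
    have hfun : ((fun k => (a :: b :: t)[2 * k]?) ∘ Nat.succ) = fun k => t[2 * k]? := by
      funext k
      have : 2 * Nat.succ k = 2 * k + 1 + 1 := by omega
      simp [Function.comp, this]
    rw [hfun, ih, takeEveryOther]

theorem slice2_from0 (xs : List Int) :
    PySem.List.slice? xs none none 2 = some (takeEveryOther xs) := by
  rw [PySem.List.slice?]
  simp only [PySem.List.sliceIndices]
  norm_num
  have hcnt : (if 0 < xs.length then (((xs.length : Int) + 2 - 1) / 2).toNat else 0)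
      = (xs.length + 1) / 2 := by
    split <;> omega
  rw [hcnt]
  have hf : (fun x : Nat => xs[(2 * (x : Int)).toNat]?) = fun x => xs[2 * x]? := by
    funext x
    have : (2 * (x : Int)).toNat = 2 * x := by omega
    rw [this]
  rw [hf, filterMap_stride2]

theorem slice2_from1 (xs : List Int) :
    PySem.List.slice? xs (some 1) none 2 = some (takeEveryOther xs.tail) := by
  rw [PySem.List.slice?]
  simp only [PySem.List.sliceIndices]
  norm_num
  cases xs with
  | nil => simp [takeEveryOther]
  | cons a t =>
    have hcnt : (if 1 < (a :: t).length then
        (((a :: t).length : Int) - min 1 ((a :: t).length : Int) + 2 - 1) / 2 |>.toNat else 0)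
        = (t.length + 1) / 2 := by
      simp only [List.length_cons]
      split <;> [skip; skip] <;> push_cast <;> omega
    rw [hcnt]
    have hf : (fun x : Nat => (a :: t)[(min 1 ((a :: t).length : Int) + 2 * (x : Int)).toNat]?)
        = fun x => t[2 * x]? := by
      funext x
      have h1 : (min 1 ((a :: t).length : Int) + 2 * (x : Int)).toNat = 2 * x + 1 := by
        simp only [List.length_cons]; push_cast; omega
      rw [h1]
      simp
    rw [hf, filterMap_stride2]
    rfl

-- ===== VERDICT (by name: the statement is the Claim_ definition above) =====
theorem even_odd_sums_spec : Claim_equal_even_odd_sums := by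
  intro sequence _
  unfold Spec_even_odd_sums even_odd_sums even_odd_sums_alt
  rw [slice2_from0, slice2_from1]
  simp only [Option.getD_some]
  rw [foldl_enum sequence 0 [] [] le_rfl]
  norm_num
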